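-- pv_equiv track=rewrite | github.com/TheFiveBoxingWizardsJumpQuickly/CipherToolBox | app/cipher/transposition.py | skip_d
-- ===== SOURCE A (Python) =====
-- def skip_d(text, step):
--     step = int(step)
--     order = []
--     position = 0
--     l = len(text)
--     for i in range(l):
--         if position in order:
--             position += 1
--         order.append(position)
--         position = (position + step) % l
--
--     reverse_order = [0]*l
--     for i in range(l):
--         reverse_order[order[i]] = i
--
--     result = ''.join([text[i] for i in reverse_order])
--     return result
-- ===== SOURCE B (Python) =====
-- def _gcd(a, b):
--     while b:
--         a, b = b, a % b
--     return a
--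
--
-- def skip_d(text, step):
--     # Number-theoretic closed form: the skip sequence decomposes into
--     # d = gcd(step % l, l) arithmetic cycles of length l // d, the k-th
--     # starting at offset k.  No membership test, no simulation of A's bump.
--     step = int(step)
--     l = len(text)
--     if l == 0:
--         return ''
--     s = step % l
--     d = _gcd(s, l)
--     m = l // d
--     result = [''] * l
--     i = 0
--     for k in range(d):
--         for j in range(m):
--             result[(k + j * s) % l] = text[i]
--             i += 1
--     return ''.join(result)
-- ===== Notes on version B (the rewrite author's own statement) =====
-- stated objective: faster
-- what changed: B replaces A's simulation of the skip sequence (quadratic membership-scan bump loop, inverse table, gather) by a number-theoretic closed form: the positions decompose into d = gcd(step % l, l) arithmetic cycles of length l/d, the k-th starting at offset k, so B directly scatter-writes text[k*(l/d)+j] to slot (k + j*step) % l with no membership test and no inverse table.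
import Mathlib
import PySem

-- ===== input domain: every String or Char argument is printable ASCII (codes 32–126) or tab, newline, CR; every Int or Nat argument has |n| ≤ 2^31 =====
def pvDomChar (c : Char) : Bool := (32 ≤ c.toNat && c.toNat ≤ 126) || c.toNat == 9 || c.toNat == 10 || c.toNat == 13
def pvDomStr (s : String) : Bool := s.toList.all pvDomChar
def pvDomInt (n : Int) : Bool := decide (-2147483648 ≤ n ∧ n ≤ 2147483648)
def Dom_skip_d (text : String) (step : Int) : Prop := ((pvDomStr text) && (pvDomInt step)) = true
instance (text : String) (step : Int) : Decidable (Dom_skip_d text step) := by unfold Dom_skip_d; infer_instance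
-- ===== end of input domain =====

-- B replaces A's simulation of the skip sequence (membership-scan bump loop, inverse table, gather) by a
-- number-theoretic closed form — d = gcd(step % l, l) arithmetic cycles of length l/d, the k-th starting at
-- offset k — scatter-writing each character directly (faster).

-- ===== PORT A =====
-- pySetD/pyGetD totalise Python's list indexing; every index these loops use stays in range whenever Python returns.
def skip_d (text : String) (step : Int) : String :=
  let cs := text.toList
  let l := cs.length
  let st := (List.range l).foldl (fun (acc : List Int × Int) _ =>
      let position := if acc.1.contains acc.2 then acc.2 + 1 else acc.2
      (acc.1 ++ [position], PySem.Int.mod (position + step) (l : Int))) ([], (0 : Int))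
  let order := st.1
  let rev := (List.range l).foldl (fun (rev : List Int) (i : Nat) =>
      PySem.List.pySetD rev (PySem.List.pyGetD order (i : Int) 0) (i : Int))
      (List.replicate l (0 : Int))
  String.mk (rev.map (fun j => PySem.List.pyGetD cs j ' '))

-- ===== PORT B =====
-- port of Source B's hand-written Euclid loop `while b: a, b = b, a % b` (both arguments are nonnegative
-- Python ints here — s = step % l with l > 0 — so the Nat recursion is exact)
def pyGcd (a b : Nat) : Nat :=
  if h : b = 0 then a else pyGcd b (a % b)
decreasing_by exact Nat.mod_lt _ (Nat.pos_of_ne_zero h)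

def skip_d_alt (text : String) (step : Int) : String :=
  let cs := text.toList
  let l := cs.length
  if l = 0 then "" else
    let s := PySem.Int.mod step (l : Int)
    let d := pyGcd s.toNat l
    let m := l / d
    let res := (List.range d).foldl (fun (acc : List Char × Nat) (k : Nat) =>
        (List.range m).foldl (fun (acc : List Char × Nat) (j : Nat) =>
            (PySem.List.pySetD acc.1 (PySem.Int.mod ((k : Int) + (j : Int) * s) (l : Int))
               (PySem.List.pyGetD cs (acc.2 : Int) ' '), acc.2 + 1)) acc)
      (List.replicate l ' ', 0)
    String.mk res.1

-- ===== PRECONDITION & SPEC =====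
def Spec_skip_d (text : String) (step : Int) (out : String) : Prop := out = skip_d_alt text step
instance (text : String) (step : Int) (out : String) : Decidable (Spec_skip_d text step out) := by unfold Spec_skip_d; infer_instance

-- ===== CLAIM (what is proved, stated in full; the proofs are below) =====
def Claim_equal_skip_d : Prop := ∀ (text : String) (step : Int), Dom_skip_d text step → Spec_skip_d text step (skip_d text step)

-- ===== LEMMAS AND PROOFS =====

theorem pyGcd_eq_gcd (a b : Nat) : pyGcd a b = Nat.gcd a b := by
  induction b using Nat.strong_induction_on generalizing a with
  | _ b ih =>
    rw [pyGcd]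
    split
    · next h => subst h; simp
    · next h =>
      rw [ih _ (Nat.mod_lt _ (Nat.pos_of_ne_zero h)), Nat.gcd_comm b (a % b),
        ← Nat.gcd_rec b a, Nat.gcd_comm]

-- the position emitted at step t of the skip sequence: phase t/m, index t%m inside the phase
def pvE (sn l m t : Nat) : Nat := (t / m + t % m * sn) % l

-- the incoming `position` value at the start of iteration t of A's first loop
def pvPin (step : Int) (sn l m t : Nat) : Int :=
  if t = 0 then 0 else PySem.Int.mod (((pvE sn l m (t - 1)) : Int) + step) (l : Int)

-- the sequence of positions emitted by A's bump-and-step loop, n more iterations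
def pvEmits (step l : Int) : List Int → Int → Nat → List Int
  | _, _, 0 => []
  | order, pos, n + 1 =>
    let p := if order.contains pos then pos + 1 else pos
    p :: pvEmits step l (order ++ [p]) (PySem.Int.mod (p + step) l) n

-- scatter characters cs into res at slots es
def pvScatter : List Char → List Int → List Char → List Char
  | res, e :: es, c :: cs => pvScatter (PySem.List.pySetD res e c) es cs
  | res, _, _ => res

-- scatter the indices i, i+1, … into res at slots es
def pvScatterIdx : List Int → List Int → Int → List Int
  | res, e :: es, i => pvScatterIdx (PySem.List.pySetD res e i) es (i + 1)
  | res, [], _ => res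

-- A's first loop collects exactly pvEmits
theorem pvA1 (step l : Int) (xs : List Nat) (order : List Int) (pos : Int) :
    (xs.foldl (fun (acc : List Int × Int) _ =>
        let position := if acc.1.contains acc.2 then acc.2 + 1 else acc.2
        (acc.1 ++ [position], PySem.Int.mod (position + step) l)) (order, pos)).1
      = order ++ pvEmits step l order pos xs.length := by
  induction xs generalizing order pos with
  | nil => simp [pvEmits]
  | cons x xs ih =>
    rw [List.foldl_cons, ih]
    simp [pvEmits, List.append_assoc]

-- divmod of k*m + j for j < m
theorem pv_divmod (k m j : Nat) (hj : j < m) :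
    (k * m + j) / m = k ∧ (k * m + j) % m = j := by
  constructor
  · rw [Nat.add_comm, Nat.mul_comm, Nat.add_mul_div_left _ _ (by omega : 0 < m),
      Nat.div_eq_of_lt hj]
    omega
  · rw [Nat.add_comm, Nat.mul_comm, Nat.add_mul_mod_self_left, Nat.mod_eq_of_lt hj]

-- injectivity of pvE on [0, l)
theorem pvE_inj (sn l d m : Nat) (hl : 0 < l) (hd : d = Nat.gcd sn l) (hm : m = l / d)
    (u v : Nat) (hu : u < l) (hv : v < l) (he : pvE sn l m u = pvE sn l m v) : u = v := by
  have hd_l : d ∣ l := hd ▸ Nat.gcd_dvd_right sn l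
  have hd_sn : d ∣ sn := hd ▸ Nat.gcd_dvd_left sn l
  have hml : m * d = l := hm ▸ Nat.div_mul_cancel hd_l
  have hmpos : 0 < m := by
    rcases Nat.eq_zero_or_pos m with h | h
    · subst h; simp at hml; omega
    · exact h
  have hml2 : d * m = l := by rw [Nat.mul_comm]; exact hml
  obtain ⟨c, hc⟩ := hd_sn
  have hju : u % m < m := Nat.mod_lt _ hmpos
  have hjv : v % m < m := Nat.mod_lt _ hmpos
  have hku : u / m < d := (Nat.div_lt_iff_lt_mul hmpos).2 (by omega)
  have hkv : v / m < d := (Nat.div_lt_iff_lt_mul hmpos).2 (by omega)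
  unfold pvE at he
  -- phases agree: reduce the equality mod d
  have hmodd : ∀ k j : Nat, k < d → (k + j * sn) % l % d = k := by
    intro k j hk
    rw [Nat.mod_mod_of_dvd _ hd_l, hc, show k + j * (d * c) = k + (j * c) * d by ring,
      Nat.add_mul_mod_self_right, Nat.mod_eq_of_lt hk]
  have hk : u / m = v / m := by
    have h1 := hmodd (u / m) (u % m) hku
    have h2 := hmodd (v / m) (v % m) hkv
    rw [← h1, ← h2, he]
  -- in-phase indices agree: cancel sn mod l
  have hmeq : Nat.ModEq l (u % m * sn) (v % m * sn) := by
    have h2 : u / m + u % m * sn ≡ u / m + v % m * sn [MOD l] := by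
      unfold Nat.ModEq
      rw [he, hk]
    exact h2.add_left_cancel' _
  have hj : u % m = v % m := by
    have h3 := Nat.ModEq.cancel_right_div_gcd hl hmeq
    rw [Nat.gcd_comm l sn, ← hd, ← hm] at h3
    unfold Nat.ModEq at h3
    rwa [Nat.mod_eq_of_lt hju, Nat.mod_eq_of_lt hjv] at h3
  rw [← Nat.div_add_mod u m, ← Nat.div_add_mod v m, hk, hj]

-- bump step: the candidate at iteration t, after the (single) bump, is exactly pvE t
theorem pv_bump (step : Int) (sn l d m : Nat) (hl : 0 < l) (hd : d = Nat.gcd sn l)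
    (hm : m = l / d) (hs : PySem.Int.mod step (l : Int) = (sn : Int)) (t : Nat) (ht : t < l) :
    (if (((List.range t).map (fun u => ((pvE sn l m u : Nat) : Int))).contains
          (pvPin step sn l m t)) then pvPin step sn l m t + 1 else pvPin step sn l m t)
      = ((pvE sn l m t : Nat) : Int) := by
  have hd_l : d ∣ l := hd ▸ Nat.gcd_dvd_right sn l
  have hd_sn : d ∣ sn := hd ▸ Nat.gcd_dvd_left sn l
  have hml : m * d = l := hm ▸ Nat.div_mul_cancel hd_l
  have hml2 : d * m = l := by rw [Nat.mul_comm]; exact hml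
  have hmpos : 0 < m := by
    rcases Nat.eq_zero_or_pos m with h | h
    · subst h; simp at hml; omega
    · exact h
  have hlpos : (0 : Int) < (l : Int) := by exact_mod_cast hl
  cases t with
  | zero =>
    simp [pvPin, pvE, Nat.zero_mod]
  | succ t' =>
    have ht' : t' < l := by omega
    have hjlt : t' % m < m := Nat.mod_lt _ hmpos
    have hklt : t' / m < d := (Nat.div_lt_iff_lt_mul hmpos).2 (by omega)
    have htm : t' = (t' / m) * m + t' % m := by
      rw [Nat.mul_comm]
      exact (Nat.div_add_mod t' m).symm
    have hstep : step % (l : Int) = (sn : Int) := by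
      rw [← PySem.Int.mod_eq_emod_of_pos hlpos, hs]
    -- the incoming position is (pvE t' + sn) % l, as a Nat
    have hpin : pvPin step sn l m (t' + 1)
        = (((pvE sn l m t' + sn) % l : Nat) : Int) := by
      rw [pvPin, if_neg (by omega : ¬ t' + 1 = 0), Nat.add_sub_cancel,
        PySem.Int.mod_eq_emod_of_pos hlpos, Int.natCast_emod, Nat.cast_add,
        Int.add_emod, hstep, Int.emod_add_emod]
    have hv : (pvE sn l m t' + sn) % l = (t' / m + (t' % m + 1) * sn) % l := by
      rw [pvE, Nat.mod_add_mod]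
      congr 1
      ring
    rcases Nat.lt_or_ge (t' % m + 1) m with hc | hc
    · -- still inside the current phase: no bump
      have hdm := pv_divmod (t' / m) m (t' % m + 1) hc
      have ht1 : t' + 1 = (t' / m) * m + (t' % m + 1) := by omega
      have hEt : pvE sn l m (t' + 1) = (t' / m + (t' % m + 1) * sn) % l := by
        rw [ht1, pvE, hdm.1, hdm.2]
      have hpinE : pvPin step sn l m (t' + 1) = ((pvE sn l m (t' + 1) : Nat) : Int) := by
        rw [hpin, hv, ← hEt]
      rw [if_neg, hpinE]
      rw [hpinE]
      intro hmem
      have hmem2 := (List.elem_iff).1 hmem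
      obtain ⟨u, hu, heq⟩ := List.mem_map.1 hmem2
      have hu2 : u < t' + 1 := List.mem_range.1 hu
      have heq2 : pvE sn l m u = pvE sn l m (t' + 1) := by exact_mod_cast heq
      have := pvE_inj sn l d m hl hd hm u (t' + 1) (by omega) ht heq2
      omega
    · -- phase boundary: the candidate is the already-used k = t'/m, bump to k+1
      have hc2 : t' % m + 1 = m := by omega
      obtain ⟨c, hcc⟩ := hd_sn
      have hdlel : d ≤ l := Nat.le_of_dvd hl hd_l
      have hv2 : (pvE sn l m t' + sn) % l = t' / m := by
        rw [hv, hc2, show t' / m + m * sn = t' / m + l * c from by rw [hcc, ← hml]; ring,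
          Nat.add_mul_mod_self_left]
        exact Nat.mod_eq_of_lt (by omega)
      have hdm0 := pv_divmod (t' / m) m 0 hmpos
      have hkm : pvE sn l m ((t' / m) * m) = t' / m := by
        rw [show (t' / m) * m = (t' / m) * m + 0 from rfl, pvE, hdm0.1, hdm0.2]
        simp only [Nat.zero_mul, Nat.add_zero]
        exact Nat.mod_eq_of_lt (by omega)
      have hmem : ((t' / m : Nat) : Int) ∈ (List.range (t' + 1)).map
          (fun u => ((pvE sn l m u : Nat) : Int)) :=
        List.mem_map.2 ⟨(t' / m) * m, List.mem_range.2 (by omega), by rw [hkm]⟩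
      rw [hpin, hv2, if_pos (List.elem_eq_true_of_mem hmem)]
      -- the bumped value is k+1 = pvE (t'+1)
      have hmul : (t' / m + 1) * m = (t' / m) * m + m := by ring
      have ht1 : t' + 1 = (t' / m + 1) * m + 0 := by omega
      have hk1d : t' / m + 1 < d := by
        by_contra hcon
        have : d ≤ t' / m + 1 := by omega
        have : d * m ≤ (t' / m + 1) * m := Nat.mul_le_mul_right m this
        omega
      have hdm1 := pv_divmod (t' / m + 1) m 0 hmpos
      have hEt : pvE sn l m (t' + 1) = t' / m + 1 := by
        rw [ht1, pvE, hdm1.1, hdm1.2]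
        simp only [Nat.zero_mul, Nat.add_zero]
        exact Nat.mod_eq_of_lt (by omega)
      rw [hEt]
      push_cast
      ring

-- A's emitted sequence is pvE, pointwise
theorem pvEmits_eq_E (step : Int) (sn l d m : Nat) (hl : 0 < l) (hd : d = Nat.gcd sn l)
    (hm : m = l / d) (hs : PySem.Int.mod step (l : Int) = (sn : Int)) :
    ∀ (n t : Nat), t + n = l →
      pvEmits step (l : Int) ((List.range t).map (fun u => ((pvE sn l m u : Nat) : Int)))
        (pvPin step sn l m t) n
      = ((List.range n).map (fun r => ((pvE sn l m (t + r) : Nat) : Int))) := by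
  intro n
  induction n with
  | zero => intro t ht; simp [pvEmits]
  | succ n ih =>
    intro t ht
    have hbump := pv_bump step sn l d m hl hd hm hs t (by omega)
    simp only [pvEmits]
    rw [hbump]
    have hord : (List.range t).map (fun u => ((pvE sn l m u : Nat) : Int))
        ++ [((pvE sn l m t : Nat) : Int)]
        = (List.range (t + 1)).map (fun u => ((pvE sn l m u : Nat) : Int)) := by
      rw [List.range_succ, List.map_append, List.map_singleton]
    have hpos : PySem.Int.mod (((pvE sn l m t : Nat) : Int) + step) (l : Int)
        = pvPin step sn l m (t + 1) := by
      rw [pvPin, if_neg (by omega : ¬ t + 1 = 0), Nat.add_sub_cancel]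
    rw [hord, hpos, ih (t + 1) (by omega), List.range_succ_eq_map, List.map_cons,
      List.map_map]
    refine congrArg₂ _ (by norm_num) ?_
    apply List.map_congr_left
    intro r _
    show ((pvE sn l m (t + 1 + r) : Nat) : Int) = ((pvE sn l m (t + (r + 1)) : Nat) : Int)
    rw [show t + 1 + r = t + (r + 1) from by omega]

-- every slot below l is hit by pvE
theorem pvE_cover (sn l d m : Nat) (hl : 0 < l) (hd : d = Nat.gcd sn l) (hm : m = l / d)
    (q : Nat) (hq : q < l) :
    ((q : Nat) : Int) ∈ (List.range l).map (fun u => ((pvE sn l m u : Nat) : Int)) := by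
  have hnodup : ((List.range l).map (pvE sn l m)).Nodup := by
    refine List.Nodup.map_on ?_ List.nodup_range
    intro u hu v hv he
    exact pvE_inj sn l d m hl hd hm u v (List.mem_range.1 hu) (List.mem_range.1 hv) he
  have hsub : ((List.range l).map (pvE sn l m)).toFinset ⊆ Finset.range l := by
    intro x hx
    obtain ⟨u, _, hu⟩ := List.mem_map.1 (List.mem_toFinset.1 hx)
    exact Finset.mem_range.2 (hu ▸ Nat.mod_lt _ hl)
  have hcard : (Finset.range l).card ≤ ((List.range l).map (pvE sn l m)).toFinset.card := by
    rw [List.toFinset_card_of_nodup hnodup, List.length_map, List.length_range,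
      Finset.card_range]
  have heq := Finset.eq_of_subset_of_card_le hsub hcard
  have hq2 : q ∈ (List.range l).map (pvE sn l m) :=
    List.mem_toFinset.1 (heq ▸ Finset.mem_range.2 hq)
  obtain ⟨u, hu, hue⟩ := List.mem_map.1 hq2
  exact List.mem_map.2 ⟨u, hu, by rw [hue]⟩

-- A's second loop is pvScatterIdx over order
theorem pvA2 (tail pre : List Int) (rev : List Int) :
    ((List.range' pre.length tail.length).foldl (fun (rev : List Int) (i : Nat) =>
        PySem.List.pySetD rev (PySem.List.pyGetD (pre ++ tail) (i : Int) 0) (i : Int)) rev)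
      = pvScatterIdx rev tail (pre.length : Int) := by
  induction tail generalizing pre rev with
  | nil => simp [pvScatterIdx]
  | cons t ts ih =>
    have hget : PySem.List.pyGetD (pre ++ t :: ts) ((pre.length : Nat) : Int) 0 = t := by
      rw [PySem.List.pyGetD_natCast, List.getD_eq_getElem?_getD,
        List.getElem?_append_right (Nat.le_refl _)]
      simp
    rw [List.length_cons, List.range'_succ, List.foldl_cons, hget, pvScatterIdx]
    have h2 := ih (pre ++ [t]) (PySem.List.pySetD rev t ((pre.length : Nat) : Int))
    simp only [List.length_append, List.length_singleton, List.append_assoc,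
      List.singleton_append, Nat.cast_add, Nat.cast_one] at h2
    exact h2

-- map over pySetD commutes (nonnegative index)
theorem pv_map_pySetD (g : Int → Char) (res : List Int) (e v : Int) (he : 0 ≤ e) :
    (PySem.List.pySetD res e v).map g = PySem.List.pySetD (res.map g) e (g v) := by
  rw [PySem.List.pySetD_of_nonneg _ _ he, PySem.List.pySetD_of_nonneg _ _ he, List.map_set]

-- mapping the gather over pvScatterIdx gives pvScatter of the gathered values
theorem pv_map_scatterIdx (g : Int → Char) (es : List Int) (hes : ∀ e ∈ es, 0 ≤ e)
    (res : List Int) (i : Nat) :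
    (pvScatterIdx res es ((i : Nat) : Int)).map g
      = pvScatter (res.map g) es ((List.range es.length).map (fun k => g (((i + k : Nat)) : Int))) := by
  induction es generalizing res i with
  | nil => simp [pvScatterIdx, pvScatter]
  | cons e es ih =>
    have h2 : (List.range (es.length + 1)).map (fun k => g (((i + k : Nat)) : Int))
        = g ((i : Nat) : Int) ::
          (List.range es.length).map (fun k => g ((((i + 1) + k : Nat)) : Int)) := by
      rw [List.range_succ_eq_map, List.map_cons, List.map_map]
      refine congrArg₂ _ (by norm_num) ?_
      apply List.map_congr_left
      intro k _
      show g (((i + (k + 1) : Nat)) : Int) = g ((((i + 1) + k : Nat)) : Int)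
      rw [show i + (k + 1) = (i + 1) + k from by omega]
    rw [List.length_cons, h2, pvScatterIdx, pvScatter]
    have h1 : ((i : Int) + 1) = (((i + 1 : Nat)) : Int) := by push_cast; ring
    rw [h1, ih (fun x hx => hes x (by simp [hx])) _ (i + 1),
      pv_map_pySetD g res e _ (hes e (by simp))]

-- gathering the identity indices over cs returns cs
theorem pv_gather_range (cs : List Char) :
    (List.range cs.length).map (fun k => PySem.List.pyGetD cs ((k : Nat) : Int) ' ') = cs := by
  apply List.ext_getElem
  · simp
  · intro n h1 h2
    simp only [List.getElem_map, List.getElem_range]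
    rw [PySem.List.pyGetD_natCast]
    simp at h1
    simp [List.getD, List.getElem?_eq_getElem h1]

-- scatters that cover every slot do not depend on the initial filler
theorem pvScatter_congr (es : List Int) (chars : List Char) (res1 res2 : List Char)
    (hlen : es.length = chars.length) (hrl : res1.length = res2.length)
    (hsl : ∀ e ∈ es, 0 ≤ e)
    (hcov : ∀ q : Nat, q < res1.length → res1[q]? = res2[q]? ∨ ((q : Nat) : Int) ∈ es) :
    pvScatter res1 es chars = pvScatter res2 es chars := by
  induction es generalizing chars res1 res2 with
  | nil =>
    have : res1 = res2 := by
      apply List.ext_getElem?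
      intro q
      by_cases hq : q < res1.length
      · rcases hcov q hq with h | h
        · exact h
        · simp at h
      · rw [List.getElem?_eq_none (by omega), List.getElem?_eq_none (by omega)]
    cases chars <;> simp [pvScatter, this]
  | cons e es ih =>
    cases chars with
    | nil => simp at hlen
    | cons c cs =>
      have he0 : 0 ≤ e := hsl e List.mem_cons_self
      simp only [pvScatter]
      refine ih cs _ _ (by simpa using hlen) ?_ (fun x hx => hsl x (List.mem_cons_of_mem _ hx)) ?_
      · rw [PySem.List.pySetD_of_nonneg _ _ he0, PySem.List.pySetD_of_nonneg _ _ he0,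
          List.length_set, List.length_set, hrl]
      · intro q hq
        rw [PySem.List.pySetD_of_nonneg _ _ he0, List.length_set] at hq
        rw [PySem.List.pySetD_of_nonneg _ _ he0, PySem.List.pySetD_of_nonneg _ _ he0]
        by_cases hqe : q = e.toNat
        · left
          subst hqe
          rw [List.getElem?_set_self (by omega), List.getElem?_set_self (by omega)]
        · rcases hcov q hq with h | h
          · left
            rw [List.getElem?_set_ne (by omega), List.getElem?_set_ne (by omega)]
            exact h
          · rcases List.mem_cons.1 h with h1 | h2
            · exact absurd (by omega : q = e.toNat) hqe
            · right; exact h2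

-- pvScatter over concatenated slot/char lists
theorem pvScatter_append (es1 es2 : List Int) (cs1 cs2 : List Char) (res : List Char)
    (h : es1.length = cs1.length) :
    pvScatter res (es1 ++ es2) (cs1 ++ cs2) = pvScatter (pvScatter res es1 cs1) es2 cs2 := by
  induction es1 generalizing cs1 res with
  | nil => cases cs1 with
    | nil => simp [pvScatter]
    | cons c cs => simp at h
  | cons e es ih =>
    cases cs1 with
    | nil => simp at h
    | cons c cs =>
      simp only [List.cons_append, pvScatter]
      exact ih cs _ (by simpa using h)

-- B's inner loop is a scatter of consecutive characters at the given slots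
theorem pvB_inner (cs : List Char) (slot : Nat → Int) :
    ∀ (js : List Nat) (res : List Char) (i : Nat),
      (js.foldl (fun (acc : List Char × Nat) j =>
          (PySem.List.pySetD acc.1 (slot j) (PySem.List.pyGetD cs (acc.2 : Int) ' '), acc.2 + 1))
        (res, i))
      = (pvScatter res (js.map slot)
          ((List.range js.length).map (fun r => PySem.List.pyGetD cs ((i + r : Nat) : Int) ' ')),
         i + js.length) := by
  intro js
  induction js with
  | nil => intro res i; simp [pvScatter]
  | cons j js ih =>
    intro res i
    have hch : (List.range (js.length + 1)).map
          (fun r => PySem.List.pyGetD cs ((i + r : Nat) : Int) ' ')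
        = PySem.List.pyGetD cs ((i : Nat) : Int) ' '
          :: (List.range js.length).map
               (fun r => PySem.List.pyGetD cs ((i + 1 + r : Nat) : Int) ' ') := by
      rw [List.range_succ_eq_map, List.map_cons, List.map_map]
      refine congrArg₂ _ (by norm_num) ?_
      apply List.map_congr_left
      intro r _
      show PySem.List.pyGetD cs ((i + (r + 1) : Nat) : Int) ' ' = _
      rw [show i + (r + 1) = i + 1 + r from by omega]
    rw [List.foldl_cons, ih, List.map_cons, List.length_cons, hch, pvScatter]
    simp only [Prod.mk.injEq]
    exact ⟨trivial, by omega⟩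

-- B's nested loops scatter all characters at the closed-form slots
theorem pvB_outer (cs : List Char) (step s : Int) (sn l d m : Nat)
    (hcs : cs.length = l) (hl : 0 < l) (hsn : s = (sn : Int))
    (hd : d = Nat.gcd sn l) (hm : m = l / d) :
    ∀ (K : Nat), K ≤ d →
      ((List.range K).foldl (fun (acc : List Char × Nat) (k : Nat) =>
          (List.range m).foldl (fun (acc : List Char × Nat) (j : Nat) =>
              (PySem.List.pySetD acc.1 (PySem.Int.mod ((k : Int) + (j : Int) * s) (l : Int))
                 (PySem.List.pyGetD cs (acc.2 : Int) ' '), acc.2 + 1)) acc)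
        (List.replicate l ' ', 0))
      = (pvScatter (List.replicate l ' ')
           ((List.range (K * m)).map (fun u => ((pvE sn l m u : Nat) : Int)))
           ((List.range (K * m)).map (fun t => PySem.List.pyGetD cs ((t : Nat) : Int) ' ')),
         K * m) := by
  intro K
  induction K with
  | zero => intro _; simp [pvScatter]
  | succ K ih =>
    intro hK
    have hd_l : d ∣ l := hd ▸ Nat.gcd_dvd_right sn l
    have hml2 : d * m = l := by rw [Nat.mul_comm, hm]; exact Nat.div_mul_cancel hd_l
    have hmpos : 0 < m := by
      rcases Nat.eq_zero_or_pos m with h | h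
      · subst h; simp at hml2; omega
      · exact h
    rw [List.range_succ, List.foldl_append, ih (by omega), List.foldl_cons, List.foldl_nil,
      pvB_inner cs (fun j => PySem.Int.mod ((K : Int) + (j : Int) * s) (l : Int))
        (List.range m)]
    -- the inner slots are the closed-form positions of phase K
    have hslots : (List.range m).map
          (fun (j : Nat) => PySem.Int.mod ((K : Int) + (j : Int) * s) (l : Int))
        = (List.range m).map (fun r => ((pvE sn l m (K * m + r) : Nat) : Int)) := by
      apply List.map_congr_left
      intro j hj
      have hj2 : j < m := List.mem_range.1 hj
      have hdm := pv_divmod K m j hj2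
      rw [hsn, show (K : Int) + (j : Int) * (sn : Int) = ((K + j * sn : Nat) : Int)
          from by push_cast; ring, PySem.Int.mod_natCast, pvE, hdm.1, hdm.2]
    have hlen1 : ((List.range (K * m)).map
        (fun u => ((pvE sn l m u : Nat) : Int))).length
        = ((List.range (K * m)).map
            (fun t => PySem.List.pyGetD cs ((t : Nat) : Int) ' ')).length := by
      simp
    rw [show (K + 1) * m = K * m + m from by ring, List.range_add, List.map_append,
      List.map_append, pvScatter_append _ _ _ _ _ hlen1, List.map_map, List.map_map,
      List.length_range]
    simp only [Function.comp_def]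
    rw [hslots]

theorem skip_d_spec : Claim_equal_skip_d := by
  intro text step _
  unfold Spec_skip_d
  simp only [skip_d, skip_d_alt]
  cases hcs : text.toList with
  | nil => rfl
  | cons c0 rest =>
    -- abbreviations: l, s = step % l (nonnegative), sn, d = gcd(sn, l), m = l / d
    have hl : 0 < (c0 :: rest).length := by simp
    have hlpos : (0 : Int) < ((c0 :: rest).length : Int) := by exact_mod_cast hl
    have hs : PySem.Int.mod step ((c0 :: rest).length : Int)
        = ((PySem.Int.mod step ((c0 :: rest).length : Int)).toNat : Int) :=
      (Int.toNat_of_nonneg (PySem.Int.mod_nonneg _ hlpos)).symm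
    -- ===== A's side =====
    rw [pvA1 step (((c0 :: rest).length : Nat) : Int) (List.range (c0 :: rest).length) [] 0]
    rw [List.length_range, List.nil_append]
    have hemits := pvEmits_eq_E step
      (PySem.Int.mod step ((c0 :: rest).length : Int)).toNat (c0 :: rest).length
      (Nat.gcd (PySem.Int.mod step ((c0 :: rest).length : Int)).toNat (c0 :: rest).length)
      ((c0 :: rest).length /
        Nat.gcd (PySem.Int.mod step ((c0 :: rest).length : Int)).toNat (c0 :: rest).length)
      hl rfl rfl hs (c0 :: rest).length 0 (by omega)
    simp only [List.range_zero, List.map_nil, Nat.zero_add, pvPin, if_true] at hemits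
    rw [hemits]
    -- second loop: gather through the inverse table = scatter
    have hA2 := pvA2 ((List.range (c0 :: rest).length).map
        (fun r => ((pvE (PySem.Int.mod step ((c0 :: rest).length : Int)).toNat
          (c0 :: rest).length
          ((c0 :: rest).length /
            Nat.gcd (PySem.Int.mod step ((c0 :: rest).length : Int)).toNat
              (c0 :: rest).length) r : Nat) : Int))) [] (List.replicate (c0 :: rest).length (0 : Int))
    simp only [List.length_nil, List.nil_append, Nat.cast_zero, List.length_map,
      List.length_range] at hA2
    rw [List.range_eq_range'] at hA2
    rw [List.range_eq_range', hA2]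
    have hnn : ∀ e ∈ (List.range' 0 (c0 :: rest).length).map
        (fun r => ((pvE (PySem.Int.mod step ((c0 :: rest).length : Int)).toNat
          (c0 :: rest).length
          ((c0 :: rest).length /
            Nat.gcd (PySem.Int.mod step ((c0 :: rest).length : Int)).toNat
              (c0 :: rest).length) r : Nat) : Int)), 0 ≤ e := by
      intro e he
      obtain ⟨u, _, hu⟩ := List.mem_map.1 he
      rw [← hu]
      exact Int.natCast_nonneg _
    have hmap := pv_map_scatterIdx (fun j => PySem.List.pyGetD (c0 :: rest) j ' ') _ hnn
      (List.replicate (c0 :: rest).length (0 : Int)) 0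
    simp only [Nat.cast_zero, Nat.zero_add, List.length_map, List.length_range'] at hmap
    rw [hmap, List.map_replicate, pv_gather_range, PySem.List.pyGetD_zero_cons]
    rw [← List.range_eq_range'] at hnn ⊢
    -- ===== B's side =====
    rw [if_neg (by simp : ¬ (c0 :: rest).length = 0), pyGcd_eq_gcd]
    rw [pvB_outer (c0 :: rest) step (PySem.Int.mod step ((c0 :: rest).length : Int))
      (PySem.Int.mod step ((c0 :: rest).length : Int)).toNat (c0 :: rest).length
      (Nat.gcd (PySem.Int.mod step ((c0 :: rest).length : Int)).toNat (c0 :: rest).length)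
      ((c0 :: rest).length /
        Nat.gcd (PySem.Int.mod step ((c0 :: rest).length : Int)).toNat (c0 :: rest).length)
      rfl hl hs rfl rfl _ (Nat.le_refl _)]
    have hml2 : Nat.gcd (PySem.Int.mod step ((c0 :: rest).length : Int)).toNat
          (c0 :: rest).length *
        ((c0 :: rest).length /
          Nat.gcd (PySem.Int.mod step ((c0 :: rest).length : Int)).toNat (c0 :: rest).length)
        = (c0 :: rest).length :=
      Nat.mul_div_cancel' (Nat.gcd_dvd_right _ _)
    rw [hml2, pv_gather_range (c0 :: rest)]
    -- ===== the two scatters agree: every slot is overwritten =====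
    refine congrArg String.mk (pvScatter_congr _ _ _ _ (by simp) (by simp) hnn ?_)
    intro q hq
    right
    rw [List.length_replicate] at hq
    exact pvE_cover (PySem.Int.mod step ((c0 :: rest).length : Int)).toNat (c0 :: rest).length
      (Nat.gcd (PySem.Int.mod step ((c0 :: rest).length : Int)).toNat (c0 :: rest).length)
      ((c0 :: rest).length /
        Nat.gcd (PySem.Int.mod step ((c0 :: rest).length : Int)).toNat (c0 :: rest).length)
      hl rfl rfl q hq
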